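-- pv_equiv track=rewrite | github.com/Panzax/segmentation_case_study | scripts/cellseg3d/combine_cellseg3d_datasets.py | _parse_x_style_image_id
-- ===== SOURCE A (Python) =====
-- def _parse_x_style_image_id(stem: str) -> str:
--     """
--     Convert stems like 'X01', 'X2_left', 'X02_test' into an image_id:
--         '01', '02_left', '02_test'
--     """
--     if not stem.startswith("X"):
--         return stem
--
--     rest = stem[1:]
--     num_part = ""
--     suffix = ""
--     for ch in rest:
--         if ch.isdigit():
--             num_part += ch
--         else:
--             suffix = rest[len(num_part) :]
--             break
--
--     if not num_part:
--         return stem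
--
--     num_part = num_part.zfill(2)
--     if suffix:
--         # Drop leading underscores for cleanliness
--         suffix = suffix.lstrip("_")
--         return f"{num_part}_{suffix}"
--     return num_part
-- ===== SOURCE B (Python) =====
-- def _parse_x_style_image_id(stem: str) -> str:
--     """Same conversion, without the manual scan loop: the digit prefix is
--     found by left-stripping the digit characters and measuring lengths."""
--     if not stem.startswith("X"):
--         return stem
--     rest = stem[1:]
--     tail = rest.lstrip("0123456789")
--     num_part = rest[: len(rest) - len(tail)]
--     if not num_part:
--         return stem
--     num_part = num_part.zfill(2)
--     if tail:
--         return num_part + "_" + tail.lstrip("_")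
--     return num_part
-- ===== Notes on version B (the rewrite author's own statement) =====
-- stated objective: idiomatic
-- what changed: Replaced the character-by-character accumulation loop (with its mid-loop slice-and-break for the suffix) by a declarative split: left-stripping the ten digit characters yields the tail, and the digit prefix is recovered from the length difference; post-processing (zfill, underscore join) is unchanged.
import Mathlib
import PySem

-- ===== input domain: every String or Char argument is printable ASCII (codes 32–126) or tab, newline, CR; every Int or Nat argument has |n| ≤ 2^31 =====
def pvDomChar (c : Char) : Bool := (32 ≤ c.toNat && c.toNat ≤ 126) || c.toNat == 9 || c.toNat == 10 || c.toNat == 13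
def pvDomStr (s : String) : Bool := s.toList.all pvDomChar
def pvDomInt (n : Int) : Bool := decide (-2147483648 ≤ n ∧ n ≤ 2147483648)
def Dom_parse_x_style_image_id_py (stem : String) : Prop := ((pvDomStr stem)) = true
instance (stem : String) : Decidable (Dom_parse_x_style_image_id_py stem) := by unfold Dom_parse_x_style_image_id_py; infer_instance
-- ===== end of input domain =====

-- B replaces A's character-by-character scan loop with a declarative lstrip-based
-- split of the digit prefix (idiomatic; same post-processing).


-- ===== PORT A =====
-- the for-loop over `rest`: accumulates digit chars into num_part; on the first
-- non-digit sets suffix = rest[len(num_part):] and breaks.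
def pvLoopA (rest : List Char) : List Char → List Char → List Char × List Char
  | [], numPart => (numPart, [])
  | c :: cs, numPart =>
      if PySem.Chars.isdigit c then pvLoopA rest cs (numPart ++ [c])
      else (numPart, rest.drop numPart.length)

def parse_x_style_image_id_py (stem : String) : String :=
  if !(PySem.Str.startswith stem "X") then stem
  else
    let rest := (PySem.Str.slice stem (some 1) none).toList
    let r := pvLoopA rest rest []
    let numPart := r.1
    let suffix := r.2
    if numPart = [] then stem
    else
      let numPart := PySem.Chars.zfill numPart 2
      if suffix ≠ [] then
        -- suffix.lstrip("_"): drop the leading underscores (exact: left strip of one char)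
        String.ofList (numPart ++ '_' :: suffix.dropWhile (· == '_'))
      else String.ofList numPart

-- ===== PORT B =====
def parse_x_style_image_id_py_alt (stem : String) : String :=
  if !(PySem.Str.startswith stem "X") then stem
  else
    let rest := (PySem.Str.slice stem (some 1) none).toList
    -- rest.lstrip("0123456789"): drop leading chars belonging to the digit set (exact)
    let tail := rest.dropWhile (fun c => ['0','1','2','3','4','5','6','7','8','9'].contains c)
    let numPart := rest.take (rest.length - tail.length)
    if numPart = [] then stem
    else
      let numPart := PySem.Chars.zfill numPart 2
      if tail ≠ [] then
        -- tail.lstrip("_") (exact: left strip of one char)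
        String.ofList (numPart ++ '_' :: tail.dropWhile (· == '_'))
      else String.ofList numPart

-- ===== PRECONDITION & SPEC =====
def Spec_parse_x_style_image_id_py (stem : String) (out : String) : Prop := out = parse_x_style_image_id_py_alt stem
instance (stem : String) (out : String) : Decidable (Spec_parse_x_style_image_id_py stem out) := by unfold Spec_parse_x_style_image_id_py; infer_instance

-- ===== CLAIM (what is proved, stated in full; the proofs are below) =====
def Claim_equal_parse_x_style_image_id_py : Prop := ∀ (stem : String), Dom_parse_x_style_image_id_py stem → Spec_parse_x_style_image_id_py stem (parse_x_style_image_id_py stem)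

-- ===== LEMMAS AND PROOFS =====

-- membership in the literal digit set coincides with Python's isdigit test
theorem digit_set_eq_isdigit (c : Char) :
    (['0','1','2','3','4','5','6','7','8','9'].contains c) = PySem.Chars.isdigit c := by
  rw [Bool.eq_iff_iff]
  simp only [PySem.Chars.isdigit, List.contains_eq_mem, List.mem_cons, List.not_mem_nil,
    or_false, decide_eq_true_eq, Bool.and_eq_true, Char.ext_iff, Char.le_def,
    ← UInt32.toNat_inj]
  norm_num
  simp only [UInt32.le_iff_toNat_le, Char.toNat,
    show ('0').val.toNat = 48 from rfl, show ('1').val.toNat = 49 from rfl,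
    show ('2').val.toNat = 50 from rfl, show ('3').val.toNat = 51 from rfl,
    show ('4').val.toNat = 52 from rfl, show ('5').val.toNat = 53 from rfl,
    show ('6').val.toNat = 54 from rfl, show ('7').val.toNat = 55 from rfl,
    show ('8').val.toNat = 56 from rfl, show ('9').val.toNat = 57 from rfl]
  omega

-- A's loop computes the takeWhile/dropWhile split of `rest` at the first non-digit
theorem pvLoopA_spec (l : List Char) : ∀ acc : List Char,
    pvLoopA (acc ++ l) l acc =
      (acc ++ l.takeWhile PySem.Chars.isdigit, l.dropWhile PySem.Chars.isdigit) := by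
  induction l with
  | nil => intro acc; simp [pvLoopA]
  | cons c cs ih =>
    intro acc
    by_cases h : PySem.Chars.isdigit c = true
    · simp only [pvLoopA, h, if_true]
      rw [show acc ++ c :: cs = (acc ++ [c]) ++ cs from by simp, ih (acc ++ [c])]
      simp [h]
    · simp [pvLoopA, h]

theorem pvLoopA_nil (l : List Char) :
    pvLoopA l l [] = (l.takeWhile PySem.Chars.isdigit, l.dropWhile PySem.Chars.isdigit) := by
  simpa using pvLoopA_spec l []

-- B's length-difference take equals takeWhile
theorem take_sub_dropWhile (p : Char → Bool) (l : List Char) :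
    l.take (l.length - (l.dropWhile p).length) = l.takeWhile p := by
  have hlen : l.length = (l.takeWhile p).length + (l.dropWhile p).length := by
    conv_lhs => rw [← List.takeWhile_append_dropWhile (p := p) (l := l)]
    exact List.length_append
  rw [show l.length - (l.dropWhile p).length = (l.takeWhile p).length by omega]
  exact (List.prefix_iff_eq_take.mp (List.takeWhile_prefix p)).symm

-- ===== VERDICT (by name: the statement is the Claim_ definition above) =====
theorem parse_x_style_image_id_py_spec : Claim_equal_parse_x_style_image_id_py := by
  intro stem _
  unfold Spec_parse_x_style_image_id_py parse_x_style_image_id_py parse_x_style_image_id_py_alt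
  simp only [funext digit_set_eq_isdigit, pvLoopA_nil, take_sub_dropWhile]
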